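-- pv_equiv track=rewrite | github.com/OpenAPITools/openapi-generator | samples/openapi3/client/petstore/python-experimental/venv/lib/python3.8/site-packages/mypy/test/testdaemon.py | parse_script
-- ===== SOURCE A (Python) =====
-- from typing import List, Tuple
--
-- def parse_script(input: List[str]) -> List[List[str]]:
--     """Parse testcase.input into steps.
--
--     Each command starts with a line starting with '$'.
--     The first line (less '$') is sent to the shell.
--     The remaining lines are expected output.
--     """
--     steps = []
--     step = []  # type: List[str]
--     for line in input:
--         if line.startswith('$'):
--             if step:
--                 assert step[0].startswith('$')
--                 steps.append(step)
--                 step = []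
--         step.append(line)
--     if step:
--         steps.append(step)
--     return steps
-- ===== SOURCE B (Python) =====
-- from typing import List
--
--
-- def parse_script(input: List[str]) -> List[List[str]]:
--     """Split the script into steps by slicing between '$'-marker positions."""
--     if not input:
--         return []
--     markers = [i for i, line in enumerate(input) if line.startswith('$')]
--     starts = markers if markers and markers[0] == 0 else [0] + markers
--     bounds = starts + [len(input)]
--     return [input[a:b] for a, b in zip(bounds, bounds[1:])]
-- ===== Notes on version B (the rewrite author's own statement) =====
-- stated objective: alternative
-- what changed: B replaces A's stateful accumulate-and-flush fold with an index-based formulation: it computes the marker positions of '$'-lines once and returns the slices between consecutive markers.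
-- outside the precondition, e.g. on parse_script(['echo', '$ ls']): A raises AssertionError, B returns [['echo'], ['$ ls']]
import Mathlib
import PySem

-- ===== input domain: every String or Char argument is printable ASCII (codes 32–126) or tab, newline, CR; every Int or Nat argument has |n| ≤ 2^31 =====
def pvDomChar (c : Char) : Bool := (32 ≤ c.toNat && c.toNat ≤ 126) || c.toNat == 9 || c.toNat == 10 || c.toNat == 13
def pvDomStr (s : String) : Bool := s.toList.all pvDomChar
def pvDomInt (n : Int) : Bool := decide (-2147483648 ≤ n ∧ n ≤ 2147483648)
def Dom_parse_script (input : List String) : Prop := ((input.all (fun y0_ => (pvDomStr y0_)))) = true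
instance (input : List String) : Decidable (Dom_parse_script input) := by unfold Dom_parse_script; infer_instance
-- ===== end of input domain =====

-- B replaces A's stateful accumulate-and-flush fold by computing the '$'-marker
-- positions once and slicing between consecutive markers (alternative decomposition,
-- same cost); where A raises AssertionError (leading non-'$' lines before a '$' line)
-- B returns the leading lines as a first step.


-- ===== PORT A =====
-- fold state = (steps, step); the Python assert always holds inside Pre_ and is not ported
def parse_script (input : List String) : List (List String) :=
  let r := input.foldl
    (fun (acc : List (List String) × List String) line =>
      if PySem.Str.startswith line "$" then
        (if acc.2 ≠ [] then (acc.1 ++ [acc.2], ([] : List String) ++ [line])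
         else (acc.1, acc.2 ++ [line]))
      else (acc.1, acc.2 ++ [line]))
    ([], [])
  if r.2 ≠ [] then r.1 ++ [r.2] else r.1

-- ===== PORT B =====
def parse_script_alt (input : List String) : List (List String) :=
  if input = [] then []
  else
    let markers := ((PySem.List.enumerate input).filter
        (fun p => PySem.Str.startswith p.2 "$")).map (fun p => p.1)
    let starts := if markers ≠ [] ∧ markers.headI = 0 then markers else 0 :: markers
    let bounds := starts ++ [(input.length : Int)]
    (bounds.zip bounds.tail).map (fun p => PySem.List.slice input (some p.1) (some p.2))

-- ===== PRECONDITION & SPEC =====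
-- Pre_ excludes exactly the inputs on which A raises AssertionError: a first line not
-- starting with '$' followed (anywhere) by a line that does.
def Pre_parse_script (input : List String) : Prop :=
  input = [] ∨ PySem.Str.startswith input.headI "$" = true
    ∨ input.all (fun l => !PySem.Str.startswith l "$") = true
instance (input : List String) : Decidable (Pre_parse_script input) := by
  unfold Pre_parse_script; infer_instance

def pvWitness_parse_script : List String := ["$ echo hi", "hi", "$ ls", "out"]

def Spec_parse_script (input : List String) (out : List (List String)) : Prop :=
  out = parse_script_alt input
instance (input : List String) (out : List (List String)) :
    Decidable (Spec_parse_script input out) := by unfold Spec_parse_script; infer_instance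

-- ===== CLAIM (what is proved, stated in full; the proofs are below) =====
def Claim_equal_parse_script : Prop := ∀ (input : List String), Dom_parse_script input →
  Pre_parse_script input → Spec_parse_script input (parse_script input)

-- ===== LEMMAS AND PROOFS =====

/-- A's grouping, as a structural recursion: `step` is the (nonempty) current group. -/
def chunkC (step : List String) : List String → List (List String)
  | [] => [step]
  | l :: ls =>
    if PySem.Str.startswith l "$" then step :: chunkC [l] ls
    else chunkC (step ++ [l]) ls

/-- marker indices of `xs` counted from `s`, Nat level. -/
def mkN (s : Nat) : List String → List Nat
  | [] => []
  | x :: xs => if PySem.Str.startswith x "$" then s :: mkN (s + 1) xs else mkN (s + 1) xs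

/-- consecutive-bound slices, Nat level. -/
def sliceChunksN (xs : List String) : List Nat → List (List String)
  | a :: b :: rest => ((xs.drop a).take (b - a)) :: sliceChunksN xs (b :: rest)
  | _ => []

/-- A's loop body, named for the proofs (alpha-equal to the lambda in `parse_script`). -/
def fA (acc : List (List String) × List String) (line : String) :
    List (List String) × List String :=
  if PySem.Str.startswith line "$" then
    (if acc.2 ≠ [] then (acc.1 ++ [acc.2], ([] : List String) ++ [line])
     else (acc.1, acc.2 ++ [line]))
  else (acc.1, acc.2 ++ [line])

lemma parse_script_eq_fA (input : List String) :
    parse_script input =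
      (if (input.foldl fA ([], [])).2 ≠ [] then
        (input.foldl fA ([], [])).1 ++ [(input.foldl fA ([], [])).2]
      else (input.foldl fA ([], [])).1) := rfl

lemma foldA (ls : List String) (steps : List (List String)) (step : List String)
    (h : step ≠ []) :
    (if (ls.foldl fA (steps, step)).2 ≠ [] then
        (ls.foldl fA (steps, step)).1 ++ [(ls.foldl fA (steps, step)).2]
      else (ls.foldl fA (steps, step)).1) = steps ++ chunkC step ls := by
  induction ls generalizing steps step with
  | nil => simp [chunkC, h]
  | cons l ls ih =>
    by_cases hl : PySem.Str.startswith l "$" = true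
    · rw [List.foldl_cons, show fA (steps, step) l = (steps ++ [step], [l]) from by
        simp only [fA]; rw [if_pos hl, if_pos h]; rfl]
      rw [ih _ _ (by simp)]
      simp only [chunkC]; rw [if_pos hl]; simp
    · rw [List.foldl_cons, show fA (steps, step) l = (steps, step ++ [l]) from by
        simp only [fA]; rw [if_neg hl]]
      rw [ih _ _ (by simp)]
      simp only [chunkC]; rw [if_neg hl]

lemma A_eq_chunkC (l : String) (ls : List String) :
    parse_script (l :: ls) = chunkC [l] ls := by
  rw [parse_script_eq_fA, List.foldl_cons,
    show fA ([], []) l = ([], [l]) from by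
      by_cases hl : PySem.Str.startswith l "$" = true
      · simp only [fA]; rw [if_pos hl]; simp
      · simp only [fA]; rw [if_neg hl]; rfl]
  exact foldA ls [] [l] (by simp)

lemma mk_eq_mkN (xs : List String) (s : Nat) :
    ((PySem.List.enumerate xs (s : Int)).filter
        (fun p => PySem.Str.startswith p.2 "$")).map (fun p => p.1)
      = (mkN s xs).map (fun n => (n : Int)) := by
  induction xs generalizing s with
  | nil => simp [mkN, PySem.List.enumerate_nil]
  | cons x xs ih =>
    rw [PySem.List.enumerate_cons]
    by_cases hx : PySem.Str.startswith x "$" = true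
    · simp only [mkN, List.filter_cons]
      rw [if_pos hx, if_pos (by simpa using hx)]
      have : ((s : Int) + 1) = ((s + 1 : Nat) : Int) := by push_cast; ring
      simp only [List.map_cons]
      rw [this, ih (s + 1)]
      rfl
    · simp only [mkN, List.filter_cons]
      rw [if_neg hx, if_neg (by simpa using hx)]
      have : ((s : Int) + 1) = ((s + 1 : Nat) : Int) := by push_cast; ring
      rw [this, ih (s + 1)]

lemma mkN_nil_of_all (xs : List String) (s : Nat)
    (h : ∀ x ∈ xs, PySem.Str.startswith x "$" = false) : mkN s xs = [] := by
  induction xs generalizing s with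
  | nil => rfl
  | cons x xs ih =>
    simp only [mkN]
    rw [if_neg (by rw [h x (by simp)]; simp)]
    exact ih (s + 1) (fun y hy => h y (by simp [hy]))

lemma mkN_append_non (pre rest : List String) (s : Nat)
    (h : ∀ x ∈ pre, PySem.Str.startswith x "$" = false) :
    mkN s (pre ++ rest) = mkN (s + pre.length) rest := by
  induction pre generalizing s with
  | nil => simp
  | cons x pre ih =>
    simp only [List.cons_append, mkN]
    rw [if_neg (by rw [h x (by simp)]; simp)]
    rw [ih (s + 1) (fun y hy => h y (by simp [hy]))]
    congr 1
    simp; omega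

lemma mkN_shift (xs : List String) (s k : Nat) :
    mkN (s + k) xs = (mkN s xs).map (fun n => n + k) := by
  induction xs generalizing s with
  | nil => rfl
  | cons x xs ih =>
    simp only [mkN]
    by_cases hx : PySem.Str.startswith x "$" = true
    · rw [if_pos hx, if_pos hx]
      have : s + k + 1 = (s + 1) + k := by omega
      simp [this, ih (s + 1)]
    · rw [if_neg hx, if_neg hx]
      have : s + k + 1 = (s + 1) + k := by omega
      rw [this, ih (s + 1)]

lemma sliceChunksN_shift (xs : List String) (bs : List Nat) (k : Nat) :
    sliceChunksN xs (bs.map (fun n => n + k)) = sliceChunksN (xs.drop k) bs := by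
  induction bs with
  | nil => rfl
  | cons a bs ih =>
    cases bs with
    | nil => rfl
    | cons b rest =>
      have e : (a :: b :: rest).map (fun n => n + k)
          = (a + k) :: (b + k) :: rest.map (fun n => n + k) := rfl
      rw [e]
      simp only [sliceChunksN]
      rw [List.drop_drop, show b + k - (a + k) = b - a from by omega,
        Nat.add_comm k a]
      rw [show ((b + k) :: rest.map (fun n => n + k))
          = (b :: rest).map (fun n => n + k) from rfl, ih]

lemma chunkC_all_non (step ls : List String)
    (h : ∀ x ∈ ls, PySem.Str.startswith x "$" = false) :
    chunkC step ls = [step ++ ls] := by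
  induction ls generalizing step with
  | nil => simp [chunkC]
  | cons x xs ih =>
    simp only [chunkC]
    rw [if_neg (by rw [h x (by simp)]; simp)]
    rw [ih (step ++ [x]) (fun y hy => h y (by simp [hy]))]
    simp

lemma chunkC_span (ls step : List String) {m : String} {ms : List String}
    (hpost : ls.dropWhile (fun x => !PySem.Str.startswith x "$") = m :: ms) :
    chunkC step ls
      = (step ++ ls.takeWhile (fun x => !PySem.Str.startswith x "$")) :: chunkC [m] ms := by
  induction ls generalizing step with
  | nil => simp at hpost
  | cons x xs ih =>
    by_cases hx : PySem.Str.startswith x "$" = true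
    · rw [List.dropWhile_cons_of_neg (by simpa using hx)] at hpost
      obtain ⟨rfl, rfl⟩ : x = m ∧ xs = ms := by
        constructor <;> [exact (List.cons.injEq ..).mp hpost |>.1;
          exact (List.cons.injEq ..).mp hpost |>.2]
      simp only [chunkC]
      rw [if_pos hx, List.takeWhile_cons_of_neg (by simpa using hx)]
      simp
    · rw [List.dropWhile_cons_of_pos (by simpa using eq_false_of_ne_true hx)] at hpost
      simp only [chunkC]
      rw [if_neg hx, List.takeWhile_cons_of_pos (by simpa using eq_false_of_ne_true hx)]
      rw [ih (step ++ [x]) hpost]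
      simp

lemma B_chunk (l : String) (ls : List String) (hl : PySem.Str.startswith l "$" = true) :
    sliceChunksN (l :: ls) (0 :: mkN 1 ls ++ [ls.length + 1]) = chunkC [l] ls := by
  have main : ∀ (n : Nat) (l : String) (ls : List String), ls.length < n →
      PySem.Str.startswith l "$" = true →
      sliceChunksN (l :: ls) (0 :: mkN 1 ls ++ [ls.length + 1]) = chunkC [l] ls := by
    intro n
    induction n with
    | zero => intro _ _ h; omega
    | succ n ih =>
      intro l ls hlen hl
      cases hpost : ls.dropWhile (fun x => !PySem.Str.startswith x "$") with
      | nil =>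
        have hteq : ls.takeWhile (fun x => !PySem.Str.startswith x "$") = ls := by
          have h0 := List.takeWhile_append_dropWhile
            (p := fun x => !PySem.Str.startswith x "$") (l := ls)
          rw [hpost, List.append_nil] at h0
          exact h0
        have hall : ∀ x ∈ ls, PySem.Str.startswith x "$" = false := by
          intro x hx
          have h2 := List.mem_takeWhile_imp (hteq ▸ hx)
          rw [Bool.not_eq_true'] at h2
          exact h2
        rw [mkN_nil_of_all ls 1 hall, chunkC_all_non _ _ hall]
        simp [sliceChunksN, List.take_of_length_le]
      | cons m ms =>
        have hsplit : ls.takeWhile (fun x => !PySem.Str.startswith x "$") ++ m :: ms = ls := by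
          rw [← hpost]; exact List.takeWhile_append_dropWhile
        set pre := ls.takeWhile (fun x => !PySem.Str.startswith x "$") with hpre
        have hprefalse : ∀ x ∈ pre, PySem.Str.startswith x "$" = false := by
          intro x hx
          have h2 := List.mem_takeWhile_imp (hpre ▸ hx)
          rw [Bool.not_eq_true'] at h2
          exact h2
        have hne : ls.dropWhile (fun x => !PySem.Str.startswith x "$") ≠ [] := by
          rw [hpost]; simp
        have hm : PySem.Str.startswith m "$" = true := by
          have h5 := List.head_dropWhile_not (fun x => !PySem.Str.startswith x "$") hne
          have h6 := List.head?_eq_head hne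
          have h6b : (ls.dropWhile (fun x => !PySem.Str.startswith x "$")).head? = some m := by
            rw [hpost]; rfl
          rw [h6] at h6b
          have h7 : m = (ls.dropWhile (fun x => !PySem.Str.startswith x "$")).head hne :=
            (Option.some.inj h6b).symm
          rw [← h7, Bool.not_eq_false'] at h5
          exact h5
        have hlength : pre.length + (ms.length + 1) = ls.length := by
          rw [← hsplit]; simp
        have hmk : mkN 1 ls = (1 + pre.length) :: mkN (1 + pre.length + 1) ms := by
          rw [← hsplit, mkN_append_non pre (m :: ms) 1 hprefalse]
          simp only [mkN]
          rw [if_pos hm]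
        have hbounds : (0 :: mkN 1 ms ++ [ms.length + 1]).map (fun n => n + (1 + pre.length))
            = (1 + pre.length) :: mkN (1 + pre.length + 1) ms ++ [ls.length + 1] := by
          simp only [List.map_cons, List.map_append, List.map_nil]
          rw [show (1 : Nat) + pre.length + 1 = 1 + (1 + pre.length) from by omega, mkN_shift]
          rw [show ms.length + 1 + (1 + pre.length) = ls.length + 1 from by omega]
          simp
        rw [hmk]
        show ((l :: ls).drop 0).take (1 + pre.length - 0) ::
          sliceChunksN (l :: ls) ((1 + pre.length) :: mkN (1 + pre.length + 1) ms
            ++ [ls.length + 1]) = chunkC [l] ls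
        rw [← hbounds, sliceChunksN_shift]
        rw [show (l :: ls).drop (1 + pre.length) = m :: ms from by
          rw [← hsplit, show (1 : Nat) + pre.length = (l :: pre).length from by simp [Nat.add_comm],
            show l :: (pre ++ m :: ms) = (l :: pre) ++ m :: ms from rfl, List.drop_left]]
        rw [ih m ms (by omega) hm]
        rw [chunkC_span ls [l] hpost]
        congr 1
        rw [show (l :: ls).drop 0 = l :: ls from rfl, ← hsplit,
          show l :: (pre ++ m :: ms) = (l :: pre) ++ m :: ms from rfl]
        rw [show (1 + pre.length - 0) = (l :: pre).length from by simp [Nat.add_comm]]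
        rw [List.take_left, hsplit]
        simp only [List.cons_append, List.nil_append]
        rw [← hpre]
  exact main (ls.length + 1) l ls (by omega) hl

lemma zip_map_eq_sliceChunksN (xs : List String) (bs : List Nat) :
    (((bs.map (fun n => (n : Int))).zip (bs.map (fun n => (n : Int))).tail).map
        (fun p => PySem.List.slice xs (some p.1) (some p.2)))
      = sliceChunksN xs bs := by
  induction bs with
  | nil => rfl
  | cons a bs ih =>
    cases bs with
    | nil => rfl
    | cons b rest =>
      have e : (((a :: b :: rest).map (fun n => (n : Int))).zip
            ((a :: b :: rest).map (fun n => (n : Int))).tail).map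
            (fun p => PySem.List.slice xs (some p.1) (some p.2))
          = PySem.List.slice xs (some (a : Int)) (some (b : Int)) ::
            (((b :: rest).map (fun n => (n : Int))).zip
              ((b :: rest).map (fun n => (n : Int))).tail).map
              (fun p => PySem.List.slice xs (some p.1) (some p.2)) := rfl
      rw [e, PySem.List.slice_natCast, ih]
      simp only [sliceChunksN]

lemma mk_head (l : String) (ls : List String) :
    ((PySem.List.enumerate (l :: ls)).filter
        (fun p => PySem.Str.startswith p.2 "$")).map (fun p => p.1)
      = (mkN 0 (l :: ls)).map (fun n => (n : Int)) := by
  exact mk_eq_mkN (l :: ls) 0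

lemma B_eq_head (l : String) (ls : List String)
    (hl : PySem.Str.startswith l "$" = true) :
    parse_script_alt (l :: ls) = chunkC [l] ls := by
  have hmk : mkN 0 (l :: ls) = 0 :: mkN 1 ls := by
    simp only [mkN]; rw [if_pos hl]
  simp only [parse_script_alt]
  rw [if_neg (by simp)]
  rw [mk_head, hmk]
  rw [if_pos (by simp)]
  rw [show (((0 : Nat) :: mkN 1 ls).map (fun n => (n : Int)) ++ [((l :: ls).length : Int)])
      = ((0 :: mkN 1 ls ++ [ls.length + 1]).map (fun n => (n : Int))) from by
    simp]
  rw [zip_map_eq_sliceChunksN]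
  exact B_chunk l ls hl

lemma B_eq_non (l : String) (ls : List String)
    (hall : ∀ x ∈ l :: ls, PySem.Str.startswith x "$" = false) :
    parse_script_alt (l :: ls) = [l :: ls] := by
  have hmk : mkN 0 (l :: ls) = [] := mkN_nil_of_all _ 0 hall
  simp only [parse_script_alt]
  rw [if_neg (by simp)]
  rw [mk_head, hmk]
  rw [if_neg (by simp)]
  rw [show (((0 : Int) :: ([] : List Nat).map (fun n => (n : Int)))
        ++ [((l :: ls).length : Int)])
      = (([0, ls.length + 1] : List Nat).map (fun n => (n : Int))) from by
    simp]
  rw [zip_map_eq_sliceChunksN]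
  show ((l :: ls).drop 0).take (ls.length + 1 - 0) :: sliceChunksN (l :: ls) [ls.length + 1]
    = [l :: ls]
  simp [sliceChunksN, List.take_of_length_le]

-- ===== VERDICT (by name: the statement is the Claim_ definition above) =====
theorem parse_script_spec : Claim_equal_parse_script := by
  intro input _ hpre
  unfold Spec_parse_script
  cases input with
  | nil => rfl
  | cons l ls =>
    rcases hpre with h0 | hh | hall
    · simp at h0
    · rw [A_eq_chunkC, B_eq_head l ls (by simpa using hh)]
    · have hall' : ∀ x ∈ l :: ls, PySem.Str.startswith x "$" = false := by
        intro x hx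
        have := List.all_eq_true.mp hall x hx
        rw [Bool.not_eq_true'] at this
        exact this
      rw [A_eq_chunkC, chunkC_all_non _ _ (fun y hy => hall' y (by simp [hy])),
        B_eq_non l ls hall']
      rfl
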